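-- pv_equiv track=rewrite | github.com/AlekyaKowta/charger-uptime | main.py | compute_station_uptimes
-- ===== SOURCE A (Python) =====
-- from typing import Dict, List, Tuple, Set
--
-- def merge_intervals(intervals: List[Tuple[int, int]]) -> List[Tuple[int, int]]:
--     """
--     Given a list of [start, end) intervals (with start <= end),
--     merge overlapping ones and return the merged list.
--     """
--     if not intervals:
--         return []
--
--     intervals = sorted(intervals, key=lambda x: (x[0], x[1]))
--     merged: List[List[int]] = [list(intervals[0])]
--
--     for start, end in intervals[1:]:
--         last = merged[-1]
--         if start > last[1]:
--             # disjoint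
--             merged.append([start, end])
--         else:
--             # overlapping or touching; extend the last interval
--             if end > last[1]:
--                 last[1] = end
--
--     return [(s, e) for s, e in merged]
--
-- def compute_station_uptimes(
--     station_chargers: Dict[int, Set[int]],
--     charger_reports: Dict[int, List[Tuple[int, int, bool]]],
-- ) -> Dict[int, int]:
--     """
--     For each station, compute the uptime percentage (0-100),
--     rounded down to the nearest integer.
--     """
--     station_uptimes: Dict[int, int] = {}
--
--     for station_id in sorted(station_chargers.keys()):
--         chargers = station_chargers[station_id]
--
--         # Collect all report entries and "up" intervals for this station’s chargers
--         all_entries: List[Tuple[int, int]] = []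
--         up_intervals: List[Tuple[int, int]] = []
--
--         for cid in chargers:
--             for start, end, up in charger_reports.get(cid, []):
--                 all_entries.append((start, end))
--                 if up:
--                     up_intervals.append((start, end))
--
--         if not all_entries:
--             # No data at all for this station’s chargers.
--             station_uptimes[station_id] = 0
--             continue
--
--         # Time window for this station
--         station_start = min(s for s, _ in all_entries)
--         station_end = max(e for _, e in all_entries)
--         total_span = station_end - station_start
--
--         if total_span <= 0:
--             station_uptimes[station_id] = 0
--             continue
--
--         # Sum union of up intervals
--         merged_up = merge_intervals(up_intervals)
--         up_time = sum(e - s for (s, e) in merged_up)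
--
--         # Floor to nearest integer percent
--         uptime_pct = (up_time * 100) // total_span
--         if uptime_pct < 0:
--             uptime_pct = 0
--         elif uptime_pct > 100:
--             uptime_pct = 100
--
--         station_uptimes[station_id] = uptime_pct
--
--     return station_uptimes
-- ===== SOURCE B (Python) =====
-- def _absorb(e, ivs):
--     # extend the current block's end e over intervals that start inside it
--     i = 0
--     while i < len(ivs) and ivs[i][0] <= e:
--         if ivs[i][1] > e:
--             e = ivs[i][1]
--         i += 1
--     return e, ivs[i:]
--
--
-- def _covered(ivs):
--     # ivs sorted; total length of their union, absorbed one block at a time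
--     total = 0
--     while ivs:
--         s, e = ivs[0]
--         e, ivs = _absorb(e, ivs[1:])
--         total += e - s
--     return total
--
--
-- def _uptime_pct(reports):
--     if not reports:
--         return 0
--     lo, hi = reports[0][0], reports[0][1]
--     for s, e, _ in reports[1:]:
--         if s < lo:
--             lo = s
--         if e > hi:
--             hi = e
--     span = hi - lo
--     if span <= 0:
--         return 0
--     ups = sorted((s, e) for s, e, up in reports if up)
--     return min(100, max(0, _covered(ups) * 100 // span))
--
--
-- def compute_station_uptimes(station_chargers, charger_reports):
--     # invert the station -> chargers map once: charger id -> stations listing it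
--     stations_of = {}
--     for sid, chargers in station_chargers.items():
--         for cid in chargers:
--             stations_of.setdefault(cid, []).append(sid)
--     # one pass over the reports dict, distributing each charger's reports
--     buckets = {sid: [] for sid in station_chargers}
--     for cid, reports in charger_reports.items():
--         for sid in stations_of.get(cid, []):
--             buckets[sid] = buckets[sid] + list(reports)
--     return {sid: _uptime_pct(buckets[sid]) for sid in sorted(station_chargers)}
-- ===== Notes on version B (the rewrite author's own statement) =====
-- stated objective: alternative
-- what changed: B inverts the station->chargers map into a charger->stations index and distributes each charger's reports to station buckets in one pass over the reports dict (no per-station lookup scans); the time window comes from a single running min/max fold, and the union length of the up intervals is computed by a recursive block-absorbing scan (absorb/covered) instead of materialising a merged interval list and summing it.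
import Mathlib
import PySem

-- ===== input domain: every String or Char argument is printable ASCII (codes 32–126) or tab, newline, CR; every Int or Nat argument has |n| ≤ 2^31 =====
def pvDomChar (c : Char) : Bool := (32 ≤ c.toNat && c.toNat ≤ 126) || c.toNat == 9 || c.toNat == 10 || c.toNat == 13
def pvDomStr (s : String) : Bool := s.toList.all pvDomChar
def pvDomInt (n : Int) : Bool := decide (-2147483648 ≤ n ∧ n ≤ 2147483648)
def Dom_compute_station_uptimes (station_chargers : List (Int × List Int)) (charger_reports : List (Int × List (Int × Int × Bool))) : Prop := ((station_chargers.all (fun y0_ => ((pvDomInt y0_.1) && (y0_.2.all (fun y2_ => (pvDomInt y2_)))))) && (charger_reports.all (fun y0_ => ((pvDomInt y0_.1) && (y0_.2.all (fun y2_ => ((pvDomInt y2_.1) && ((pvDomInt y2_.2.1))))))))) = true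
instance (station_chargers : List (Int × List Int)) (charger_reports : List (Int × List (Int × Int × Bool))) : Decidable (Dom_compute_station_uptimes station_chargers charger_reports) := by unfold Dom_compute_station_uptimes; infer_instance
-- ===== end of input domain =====

-- B inverts the station->chargers map and distributes reports in one pass over the reports dict,
-- gets the window by a running min/max fold and the union length by a block-absorbing recursive
-- scan instead of a merged-interval list; same results, similar cost (objective: alternative).


-- ===== PORT A =====
-- one step of A's merge loop: look at the last merged interval and extend / append
def pvMergeStep (merged : List (Int × Int)) (iv : Int × Int) : List (Int × Int) :=
  match merged.getLast? with
  | none => [iv]          -- unreachable: merged starts nonempty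
  | some last =>
    if iv.1 > last.2 then merged ++ [iv]
    else if iv.2 > last.2 then merged.dropLast ++ [(last.1, iv.2)]
    else merged

def merge_intervals (intervals : List (Int × Int)) : List (Int × Int) :=
  match PySem.List.sorted2 intervals (fun x => x.1) (fun x => x.2) with
  | [] => []
  | h :: t => t.foldl pvMergeStep [h]

-- the body of A's per-station loop
def pvStationValueA (crd : PySem.Dict Int (List (Int × Int × Bool))) (chargers : List Int) : Int :=
  let pair := chargers.foldl (fun (st : List (Int × Int) × List (Int × Int)) cid =>
      (crd.getD cid []).foldl (fun st r =>
        (st.1 ++ [(r.1, r.2.1)], if r.2.2 then st.2 ++ [(r.1, r.2.1)] else st.2)) st) ([], [])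
  let all_entries := pair.1
  let up_intervals := pair.2
  if all_entries = [] then 0
  else
    let station_start := (PySem.List.min? (all_entries.map (fun p => p.1)) (fun x => x)).getD 0
    let station_end := (PySem.List.max? (all_entries.map (fun p => p.2)) (fun x => x)).getD 0
    let total_span := station_end - station_start
    if total_span ≤ 0 then 0
    else
      let up_time := ((merge_intervals up_intervals).map (fun p => p.2 - p.1)).sum
      let pct := PySem.Int.floordiv (up_time * 100) total_span
      if pct < 0 then 0 else if pct > 100 then 100 else pct

def compute_station_uptimes (station_chargers : List (Int × List Int)) (charger_reports : List (Int × List (Int × Int × Bool))) : List (Int × Int) :=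
  let scd := PySem.Dict.ofList station_chargers
  let crd := PySem.Dict.ofList charger_reports
  ((PySem.List.sorted scd.keys (fun x => x)).foldl (fun d sid =>
      d.insert sid (pvStationValueA crd (scd.getD sid []))) PySem.Dict.empty).items

-- ===== PORT B =====
-- B's _absorb: extend the current block's end e over intervals that start inside it
def pvAbsorb (e : Int) (ivs : List (Int × Int)) : Int × List (Int × Int) :=
  match ivs with
  | [] => (e, [])
  | iv :: r => if iv.1 ≤ e then pvAbsorb (if iv.2 > e then iv.2 else e) r else (e, iv :: r)

theorem pvAbsorb_len (e : Int) (ivs : List (Int × Int)) : (pvAbsorb e ivs).2.length ≤ ivs.length := by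
  induction ivs generalizing e with
  | nil => simp [pvAbsorb]
  | cons iv r ih =>
    simp only [pvAbsorb]
    split
    · exact le_trans (ih _) (by simp)
    · simp

-- B's _covered: total length of the union of the (sorted) intervals, one block at a time
def pvCovered (ivs : List (Int × Int)) : Int :=
  match ivs with
  | [] => 0
  | iv :: r =>
    let p := pvAbsorb iv.2 r
    (p.1 - iv.1) + pvCovered p.2
termination_by ivs.length
decreasing_by
  have := pvAbsorb_len iv.2 r
  simp at *; omega

-- B's _uptime_pct
def pvUptimePct (reports : List (Int × Int × Bool)) : Int :=
  match reports with
  | [] => 0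
  | r0 :: rest =>
    let lh := rest.foldl (fun (p : Int × Int) r =>
        (if r.1 < p.1 then r.1 else p.1, if r.2.1 > p.2 then r.2.1 else p.2)) (r0.1, r0.2.1)
    let span := lh.2 - lh.1
    if span ≤ 0 then 0
    else
      let ups := PySem.List.sorted2 ((reports.filter (fun r => r.2.2)).map (fun r => (r.1, r.2.1)))
        (fun x => x.1) (fun x => x.2)
      min 100 (max 0 (PySem.Int.floordiv (pvCovered ups * 100) span))

def compute_station_uptimes_alt (station_chargers : List (Int × List Int)) (charger_reports : List (Int × List (Int × Int × Bool))) : List (Int × Int) :=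
  let scd := PySem.Dict.ofList station_chargers
  let crd := PySem.Dict.ofList charger_reports
  -- stations_of.setdefault(cid, []).append(sid)  ≡  modify cid [] (· ++ [sid])
  let stations_of := scd.items.foldl (fun d (p : Int × List Int) =>
      p.2.foldl (fun d cid => d.modify cid [] (· ++ [p.1])) d) PySem.Dict.empty
  let buckets0 := scd.keys.foldl (fun d sid =>
      d.insert sid ([] : List (Int × Int × Bool))) PySem.Dict.empty
  -- buckets[sid] = buckets[sid] + reports (sid always a key)  ≡  modify sid [] (· ++ reports)
  let buckets := crd.items.foldl (fun d (q : Int × List (Int × Int × Bool)) =>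
      (stations_of.getD q.1 []).foldl (fun d sid => d.modify sid [] (· ++ q.2)) d) buckets0
  ((PySem.List.sorted scd.keys (fun x => x)).foldl (fun d sid =>
      d.insert sid (pvUptimePct (buckets.getD sid []))) PySem.Dict.empty).items

-- ===== PRECONDITION & SPEC =====
def Spec_compute_station_uptimes (station_chargers : List (Int × List Int)) (charger_reports : List (Int × List (Int × Int × Bool))) (out : List (Int × Int)) : Prop := out = compute_station_uptimes_alt station_chargers charger_reports
instance (station_chargers : List (Int × List Int)) (charger_reports : List (Int × List (Int × Int × Bool))) (out : List (Int × Int)) : Decidable (Spec_compute_station_uptimes station_chargers charger_reports out) := by unfold Spec_compute_station_uptimes; infer_instance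

-- ===== CLAIM (what is proved, stated in full; the proofs are below) =====
def Claim_equal_compute_station_uptimes : Prop := ∀ (station_chargers : List (Int × List Int)) (charger_reports : List (Int × List (Int × Int × Bool))), Dom_compute_station_uptimes station_chargers charger_reports → Spec_compute_station_uptimes station_chargers charger_reports (compute_station_uptimes station_chargers charger_reports)

-- ===== LEMMAS AND PROOFS =====

-- A-side body re-expressed as a function of the flattened report list (proof-only helpers)
def pvPct (ra : List (Int × Int × Bool)) : Int :=
  PySem.Int.floordiv
    ((((merge_intervals ((ra.filter (fun r => r.2.2)).map (fun r => (r.1, r.2.1)))).map (fun p => p.2 - p.1)).sum) * 100)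
    ((PySem.List.max? ((ra.map (fun r => ((r.1 : Int), (r.2.1 : Int)))).map (fun p => p.2)) (fun x => x)).getD 0
      - (PySem.List.min? ((ra.map (fun r => ((r.1 : Int), (r.2.1 : Int)))).map (fun p => p.1)) (fun x => x)).getD 0)

def pvValueA' (ra : List (Int × Int × Bool)) : Int :=
  if ra.map (fun r => ((r.1 : Int), (r.2.1 : Int))) = [] then 0
  else
    if (PySem.List.max? ((ra.map (fun r => ((r.1 : Int), (r.2.1 : Int)))).map (fun p => p.2)) (fun x => x)).getD 0
        - (PySem.List.min? ((ra.map (fun r => ((r.1 : Int), (r.2.1 : Int)))).map (fun p => p.1)) (fun x => x)).getD 0 ≤ 0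
    then 0
    else
      if pvPct ra < 0 then 0 else if pvPct ra > 100 then 100 else pvPct ra

-- A's two-list inner loop over one charger's reports, described directly
theorem pvInnerA (rs : List (Int × Int × Bool)) (st : List (Int × Int) × List (Int × Int)) :
    rs.foldl (fun st r =>
        (st.1 ++ [(r.1, r.2.1)], if r.2.2 then st.2 ++ [(r.1, r.2.1)] else st.2)) st
      = (st.1 ++ rs.map (fun r => (r.1, r.2.1)),
         st.2 ++ (rs.filter (fun r => r.2.2)).map (fun r => (r.1, r.2.1))) := by
  induction rs generalizing st with
  | nil => simp
  | cons r t ih =>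
    simp only [List.foldl_cons, ih, List.map_cons, List.filter_cons]
    by_cases h : r.2.2 <;> simp [h]

-- A's outer collection loop, flattened
theorem pvCollectA (crd : PySem.Dict Int (List (Int × Int × Bool))) (chargers : List Int)
    (st : List (Int × Int) × List (Int × Int)) :
    chargers.foldl (fun st cid =>
        (crd.getD cid []).foldl (fun st r =>
          (st.1 ++ [(r.1, r.2.1)], if r.2.2 then st.2 ++ [(r.1, r.2.1)] else st.2)) st) st
      = (st.1 ++ (chargers.flatMap (fun cid => crd.getD cid [])).map (fun r => (r.1, r.2.1)),
         st.2 ++ ((chargers.flatMap (fun cid => crd.getD cid [])).filter (fun r => r.2.2)).map (fun r => (r.1, r.2.1))) := by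
  induction chargers generalizing st with
  | nil => simp
  | cons c t ih =>
    rw [List.foldl_cons, pvInnerA (crd.getD c []) st, ih]
    simp [List.append_assoc]

theorem pvStationValueA_eq (crd : PySem.Dict Int (List (Int × Int × Bool))) (chargers : List Int) :
    pvStationValueA crd chargers = pvValueA' (chargers.flatMap (fun cid => crd.getD cid [])) := by
  unfold pvStationValueA pvValueA' pvPct
  rw [pvCollectA]
  simp only [List.nil_append]

-- a closed prefix passes through one step of A's merge loop untouched
theorem pvMergeStep_prefix (closed : List (Int × Int)) (m : Int × Int) (ms : List (Int × Int)) (iv : Int × Int) :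
    pvMergeStep (closed ++ m :: ms) iv = closed ++ pvMergeStep (m :: ms) iv := by
  unfold pvMergeStep
  have h1 : (closed ++ m :: ms).getLast? = (m :: ms).getLast? := by
    rw [List.getLast?_append]
    cases hms : (m :: ms).getLast? with
    | none => simp at hms
    | some x => rfl
  rw [h1]
  cases h : (m :: ms).getLast? with
  | none => simp at h
  | some last =>
    simp only
    split_ifs with h2 h3
    · simp
    · have hd : (closed ++ m :: ms).dropLast = closed ++ (m :: ms).dropLast := by
        rw [List.dropLast_append_of_ne_nil] ; simp
      rw [hd]; simp
    · rfl

theorem pvMergeStep_ne_nil (m : Int × Int) (ms : List (Int × Int)) (iv : Int × Int) :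
    pvMergeStep (m :: ms) iv ≠ [] := by
  unfold pvMergeStep
  cases h : (m :: ms).getLast? with
  | none => simp at h
  | some last => simp only; split_ifs <;> simp

-- a closed prefix passes through the whole merge fold untouched
theorem pvFoldPrefix (t : List (Int × Int)) :
    ∀ (closed : List (Int × Int)) (m : Int × Int) (ms : List (Int × Int)),
      t.foldl pvMergeStep (closed ++ m :: ms) = closed ++ t.foldl pvMergeStep (m :: ms) := by
  induction t with
  | nil => intro closed m ms; rfl
  | cons iv t ih =>
    intro closed m ms
    simp only [List.foldl_cons]
    rw [pvMergeStep_prefix]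
    cases hm : pvMergeStep (m :: ms) iv with
    | nil => exact absurd hm (pvMergeStep_ne_nil m ms iv)
    | cons m' ms' => exact ih closed m' ms'

theorem pvCovered_cons (iv : Int × Int) (r : List (Int × Int)) :
    pvCovered (iv :: r) = ((pvAbsorb iv.2 r).1 - iv.1) + pvCovered (pvAbsorb iv.2 r).2 := by
  rw [pvCovered]

-- B's block-absorbing recursion computes the total length of A's merged list
theorem pvMergeCovered (t : List (Int × Int)) :
    ∀ (s e : Int),
      ((t.foldl pvMergeStep [(s, e)]).map (fun p => p.2 - p.1)).sum = pvCovered ((s, e) :: t) := by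
  induction t with
  | nil =>
    intro s e
    simp [pvCovered_cons, pvAbsorb, pvCovered]
  | cons iv t ih =>
    intro s e
    have hms : pvMergeStep [(s, e)] iv =
        (if iv.1 > e then [(s, e), iv]
         else if iv.2 > e then [(s, iv.2)] else [(s, e)]) := by
      simp [pvMergeStep, List.getLast?]
    by_cases hlt : iv.1 ≤ e
    · have he : pvMergeStep [(s, e)] iv = [(s, if iv.2 > e then iv.2 else e)] := by
        rw [hms, if_neg (by omega)]
        split_ifs <;> rfl
      rw [List.foldl_cons, he, ih s (if iv.2 > e then iv.2 else e)]
      rw [pvCovered_cons, pvCovered_cons]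
      have ha : pvAbsorb e (iv :: t) = pvAbsorb (if iv.2 > e then iv.2 else e) t := by
        rw [pvAbsorb, if_pos hlt]
      rw [ha]
    · have he : pvMergeStep [(s, e)] iv = [(s, e)] ++ [iv] := by
        rw [hms, if_pos (by omega)]; rfl
      rw [List.foldl_cons, he, pvFoldPrefix t [(s, e)] iv []]
      have hiv := ih iv.1 iv.2
      rw [Prod.mk.eta] at hiv
      rw [List.map_append, List.sum_append, hiv]
      rw [pvCovered_cons (s, e) (iv :: t)]
      have ha : pvAbsorb e (iv :: t) = (e, iv :: t) := by
        rw [pvAbsorb, if_neg hlt]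
      rw [ha]
      simp

theorem pvMergeSumCovered (ivs : List (Int × Int)) :
    ((merge_intervals ivs).map (fun p => p.2 - p.1)).sum
      = pvCovered (PySem.List.sorted2 ivs (fun x => x.1) (fun x => x.2)) := by
  unfold merge_intervals
  cases hs : PySem.List.sorted2 ivs (fun x => x.1) (fun x => x.2) with
  | nil => simp [pvCovered]
  | cons h t =>
    show ((t.foldl pvMergeStep [h]).map (fun p => p.2 - p.1)).sum = pvCovered (h :: t)
    have h2 := pvMergeCovered t h.1 h.2
    simpa [Prod.mk.eta] using h2

-- A's clamp chain is min/max
theorem pvClamp (x : Int) : (if x < 0 then (0 : Int) else if x > 100 then 100 else x) = min 100 (max 0 x) := by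
  split_ifs <;> omega

-- B's simultaneous running min/max fold, componentwise
theorem pvPairFold (t : List (Int × Int × Bool)) (a b : Int) :
    t.foldl (fun (p : Int × Int) r =>
        (if r.1 < p.1 then r.1 else p.1, if r.2.1 > p.2 then r.2.1 else p.2)) (a, b)
      = ((t.map (fun r => r.1)).foldl min a, (t.map (fun r => r.2.1)).foldl max b) := by
  induction t generalizing a b with
  | nil => rfl
  | cons r t ih =>
    simp only [List.foldl_cons, List.map_cons]
    rw [show (if r.1 < a then r.1 else a) = min a r.1 by omega]
    rw [show (if r.2.1 > b then r.2.1 else b) = max b r.2.1 by omega]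
    exact ih _ _

theorem pvPairFoldFst (t : List (Int × Int × Bool)) (a b : Int) :
    (t.foldl (fun (p : Int × Int) r =>
        (if r.1 < p.1 then r.1 else p.1, if r.2.1 > p.2 then r.2.1 else p.2)) (a, b)).1
      = (t.map (fun r => r.1)).foldl min a := by
  rw [pvPairFold]

theorem pvPairFoldSnd (t : List (Int × Int × Bool)) (a b : Int) :
    (t.foldl (fun (p : Int × Int) r =>
        (if r.1 < p.1 then r.1 else p.1, if r.2.1 > p.2 then r.2.1 else p.2)) (a, b)).2
      = (t.map (fun r => r.2.1)).foldl max b := by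
  rw [pvPairFold]

-- a running min/max over a nonempty list is permutation-invariant
theorem pvFoldMinPerm (x y : Int) (t u : List Int) (h : (x :: t).Perm (y :: u)) :
    t.foldl min x = u.foldl min y := by
  have ha := PySem.List.foldl_min_le t x
  have hb := PySem.List.foldl_min_le u y
  have hma : t.foldl min x ∈ x :: t := by
    rcases PySem.List.foldl_min_mem t x with h1 | h1
    · rw [h1]; exact List.mem_cons_self
    · exact List.mem_cons_of_mem _ h1
  have hmb : u.foldl min y ∈ y :: u := by
    rcases PySem.List.foldl_min_mem u y with h1 | h1
    · rw [h1]; exact List.mem_cons_self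
    · exact List.mem_cons_of_mem _ h1
  have hab : t.foldl min x ≤ u.foldl min y := by
    rcases List.mem_cons.mp ((h.symm.mem_iff).mp hmb) with h1 | h1
    · rw [h1]; exact ha.1
    · exact ha.2 _ h1
  have hba : u.foldl min y ≤ t.foldl min x := by
    rcases List.mem_cons.mp ((h.mem_iff).mp hma) with h1 | h1
    · rw [h1]; exact hb.1
    · exact hb.2 _ h1
  omega

theorem pvFoldMaxPerm (x y : Int) (t u : List Int) (h : (x :: t).Perm (y :: u)) :
    t.foldl max x = u.foldl max y := by
  have ha := PySem.List.le_foldl_max t x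
  have hb := PySem.List.le_foldl_max u y
  have hma : t.foldl max x ∈ x :: t := by
    rcases PySem.List.foldl_max_mem t x with h1 | h1
    · rw [h1]; exact List.mem_cons_self
    · exact List.mem_cons_of_mem _ h1
  have hmb : u.foldl max y ∈ y :: u := by
    rcases PySem.List.foldl_max_mem u y with h1 | h1
    · rw [h1]; exact List.mem_cons_self
    · exact List.mem_cons_of_mem _ h1
  have hab : u.foldl max y ≤ t.foldl max x := by
    rcases List.mem_cons.mp ((h.symm.mem_iff).mp hmb) with h1 | h1
    · rw [h1]; exact ha.1
    · exact ha.2 _ h1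
  have hba : t.foldl max x ≤ u.foldl max y := by
    rcases List.mem_cons.mp ((h.mem_iff).mp hma) with h1 | h1
    · rw [h1]; exact hb.1
    · exact hb.2 _ h1
  omega

-- the tuple comparison sorted2 uses is exactly the lexicographic order on Int × Int
theorem pvBeforeLex :
    (fun (a b : Int × Int) => decide (a.1 < b.1) || (!decide (b.1 < a.1) && decide (a.2 < b.2)))
      = fun (a b : Int × Int) => decide ((toLex a : Lex (Int × Int)) < toLex b) := by
  funext a b
  have hiff : (a.1 < b.1 ∨ (¬ b.1 < a.1 ∧ a.2 < b.2)) ↔ (toLex a : Lex (Int × Int)) < toLex b := by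
    rw [Prod.Lex.lt_iff]
    simp only [ofLex_toLex]
    omega
  rw [← decide_not, ← Bool.decide_and, ← Bool.decide_or]
  exact decide_eq_decide.mpr hiff

theorem pvSorted2Pairwise (xs : List (Int × Int)) :
    (PySem.List.sorted2 xs (fun x => x.1) (fun x => x.2) false).Pairwise
      (fun a b => (toLex a : Lex (Int × Int)) ≤ toLex b) := by
  have hdef : PySem.List.sorted2 xs (fun x => x.1) (fun x => x.2) false
      = xs.foldl (fun acc x =>
          PySem.List.insertBy (fun a b => decide ((toLex a : Lex (Int × Int)) < toLex b)) x acc) [] := by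
    show xs.foldl (fun acc x =>
        PySem.List.insertBy (fun a b =>
          decide (a.1 < b.1) || (!decide (b.1 < a.1) && decide (a.2 < b.2))) x acc) [] = _
    rw [pvBeforeLex]
  rw [hdef]
  suffices H : ∀ (l acc : List (Int × Int)),
      acc.Pairwise (fun a b => (toLex a : Lex (Int × Int)) ≤ toLex b) →
      (l.foldl (fun acc x =>
          PySem.List.insertBy (fun a b => decide ((toLex a : Lex (Int × Int)) < toLex b)) x acc) acc).Pairwise
        (fun a b => (toLex a : Lex (Int × Int)) ≤ toLex b) by
    exact H xs [] (by simp)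
  intro l
  induction l with
  | nil => intro acc hacc; exact hacc
  | cons x t ih =>
    intro acc hacc
    exact ih _ (PySem.List.insertBy_pairwise_le (toLex : Int × Int → Lex (Int × Int)) x acc hacc)

theorem pvSorted2PermEq (xs ys : List (Int × Int)) (h : xs.Perm ys) :
    PySem.List.sorted2 xs (fun x => x.1) (fun x => x.2) false
      = PySem.List.sorted2 ys (fun x => x.1) (fun x => x.2) false := by
  refine PySem.List.eq_of_perm_of_pairwise_le_of_injective (toLex : Int × Int → Lex (Int × Int))
    (fun a b hab => ?_) ?_ (pvSorted2Pairwise xs) (pvSorted2Pairwise ys)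
  · exact congrArg ofLex hab
  · exact ((PySem.List.sorted2_perm xs _ _ false).trans h).trans (PySem.List.sorted2_perm ys _ _ false).symm

-- the values A and B compute from one station's reports agree for permuted report lists
theorem pvValuePerm (ra bkt : List (Int × Int × Bool)) (h : ra.Perm bkt) :
    pvValueA' ra = pvUptimePct bkt := by
  cases ra with
  | nil =>
    have hb : bkt = [] := h.symm.eq_nil
    subst hb; rfl
  | cons r0 rt =>
    cases bkt with
    | nil => exact absurd h.eq_nil (by simp)
    | cons b0 bt =>
      have hB : pvUptimePct (b0 :: bt) =
          (if (bt.foldl (fun (p : Int × Int) r =>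
                  (if r.1 < p.1 then r.1 else p.1, if r.2.1 > p.2 then r.2.1 else p.2)) (b0.1, b0.2.1)).2
              - (bt.foldl (fun (p : Int × Int) r =>
                  (if r.1 < p.1 then r.1 else p.1, if r.2.1 > p.2 then r.2.1 else p.2)) (b0.1, b0.2.1)).1 ≤ 0
           then 0
           else
             min 100 (max 0 (PySem.Int.floordiv
               (pvCovered (PySem.List.sorted2 (((b0 :: bt).filter (fun r => r.2.2)).map (fun r => (r.1, r.2.1)))
                  (fun x => x.1) (fun x => x.2)) * 100)
               ((bt.foldl (fun (p : Int × Int) r =>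
                  (if r.1 < p.1 then r.1 else p.1, if r.2.1 > p.2 then r.2.1 else p.2)) (b0.1, b0.2.1)).2
                - (bt.foldl (fun (p : Int × Int) r =>
                  (if r.1 < p.1 then r.1 else p.1, if r.2.1 > p.2 then r.2.1 else p.2)) (b0.1, b0.2.1)).1)))) := rfl
      have hminA : (PySem.List.min? ((((r0 :: rt).map (fun r => ((r.1 : Int), (r.2.1 : Int)))).map (fun p => p.1))) (fun x => x)).getD 0
          = (rt.map (fun r => r.1)).foldl min r0.1 := by
        simp only [List.map_map, Function.comp_def, List.map_cons]
        rw [PySem.List.min?_id_cons]; rfl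
      have hmaxA : (PySem.List.max? ((((r0 :: rt).map (fun r => ((r.1 : Int), (r.2.1 : Int)))).map (fun p => p.2))) (fun x => x)).getD 0
          = (rt.map (fun r => r.2.1)).foldl max r0.2.1 := by
        simp only [List.map_map, Function.comp_def, List.map_cons]
        rw [PySem.List.max?_id_cons]; rfl
      have hmin : (rt.map (fun r => r.1)).foldl min r0.1 = (bt.map (fun r => r.1)).foldl min b0.1 :=
        pvFoldMinPerm _ _ _ _ (by simpa using h.map (fun r => r.1))
      have hmax : (rt.map (fun r => r.2.1)).foldl max r0.2.1 = (bt.map (fun r => r.2.1)).foldl max b0.2.1 :=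
        pvFoldMaxPerm _ _ _ _ (by simpa using h.map (fun r => r.2.1))
      have hups : PySem.List.sorted2 (((r0 :: rt).filter (fun r => r.2.2)).map (fun r => ((r.1 : Int), (r.2.1 : Int)))) (fun x => x.1) (fun x => x.2) false
          = PySem.List.sorted2 (((b0 :: bt).filter (fun r => r.2.2)).map (fun r => ((r.1 : Int), (r.2.1 : Int)))) (fun x => x.1) (fun x => x.2) false :=
        pvSorted2PermEq _ _ ((h.filter _).map _)
      unfold pvValueA' pvPct
      rw [if_neg (by simp), hB, pvPairFoldFst, pvPairFoldSnd, hminA, hmaxA, hmin, hmax]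
      by_cases hspan : (bt.map (fun r => r.2.1)).foldl max b0.2.1 - (bt.map (fun r => r.1)).foldl min b0.1 ≤ 0
      · rw [if_pos hspan, if_pos hspan]
      · rw [if_neg hspan, if_neg hspan, pvMergeSumCovered, hups, pvClamp]

-- getD through B's extend loop over a list of station ids
theorem pvExtendGetD (sids : List Int) (d : PySem.Dict Int (List (Int × Int × Bool)))
    (rs : List (Int × Int × Bool)) (sid : Int) :
    ((sids.foldl (fun d s => d.modify s [] (· ++ rs)) d).getD sid [])
      = d.getD sid [] ++ (sids.filter (fun s => s == sid)).flatMap (fun _ => rs) := by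
  induction sids generalizing d with
  | nil => simp
  | cons s t ih =>
    simp only [List.foldl_cons, List.filter_cons, ih]
    by_cases hs : s = sid
    · subst hs; simp
    · simp [PySem.Dict.getD_modify, hs, Ne.symm hs]

-- getD through B's distribution loop over the reports dict
theorem pvBucketsGetD (l : List (Int × List (Int × Int × Bool))) (inv : PySem.Dict Int (List Int))
    (d : PySem.Dict Int (List (Int × Int × Bool))) (sid : Int) :
    ((l.foldl (fun d q => (inv.getD q.1 []).foldl (fun d s => d.modify s [] (· ++ q.2)) d) d).getD sid [])
      = d.getD sid [] ++ l.flatMap (fun q => ((inv.getD q.1 []).filter (fun s => s == sid)).flatMap (fun _ => q.2)) := by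
  induction l generalizing d with
  | nil => simp
  | cons q t ih =>
    simp only [List.foldl_cons, List.flatMap_cons, ih, pvExtendGetD, List.append_assoc]

-- getD through B's bucket initialisation
theorem pvBuckets0GetD (ks : List Int) (d : PySem.Dict Int (List (Int × Int × Bool))) (sid : Int)
    (h : d.getD sid [] = []) :
    ((ks.foldl (fun d s => d.insert s ([] : List (Int × Int × Bool))) d).getD sid []) = [] := by
  induction ks generalizing d with
  | nil => exact h
  | cons k t ih =>
    simp only [List.foldl_cons]
    exact ih _ (by rw [PySem.Dict.getD_insert]; split <;> simp [h])

-- getD through B's inverted-index construction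
theorem pvInvGetD (l : List (Int × List Int)) (d : PySem.Dict Int (List Int)) (c : Int) :
    ((l.foldl (fun d p => p.2.foldl (fun d cid => d.modify cid [] (· ++ [p.1])) d) d).getD c [])
      = d.getD c [] ++ l.flatMap (fun p => (p.2.filter (fun cid => cid == c)).map (fun _ => p.1)) := by
  induction l generalizing d with
  | nil => simp
  | cons p t ih =>
    simp only [List.foldl_cons, List.flatMap_cons]
    rw [ih]
    have hinner : ∀ (d : PySem.Dict Int (List Int)),
        (p.2.foldl (fun d cid => d.modify cid [] (· ++ [p.1])) d).getD c []
          = d.getD c [] ++ (p.2.filter (fun cid => cid == c)).map (fun _ => p.1) := by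
      intro d
      have h1 : p.2.foldl (fun d cid => d.modify cid [] (· ++ [p.1])) d
          = (p.2.map (fun cid => (cid, p.1))).foldl (fun d q => d.modify q.1 [] (· ++ [q.2])) d := by
        rw [List.foldl_map]
      rw [h1, PySem.Dict.getD_foldl_modify_append, List.filter_map]
      simp [Function.comp_def, List.map_map]
    rw [hinner, List.append_assoc]

-- filtering the inverted index's entry back to one station
theorem pvInvFilterNot (l : List (Int × List Int)) (sid c : Int) (h : sid ∉ l.map (fun p => p.1)) :
    ((l.flatMap (fun p => (p.2.filter (fun cid => cid == c)).map (fun _ => p.1))).filter (fun s => s == sid)) = [] := by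
  induction l with
  | nil => rfl
  | cons p t ih =>
    simp only [List.map_cons, List.mem_cons, not_or] at h
    simp only [List.flatMap_cons, List.filter_append, ih h.2, List.append_nil]
    refine List.filter_eq_nil_iff.mpr ?_
    intro a ha
    rcases List.mem_map.mp ha with ⟨x, _, rfl⟩
    simp only [beq_iff_eq]
    exact fun hh => h.1 hh.symm

theorem pvInvFilter (l : List (Int × List Int)) (sid : Int) (chs : List Int) (c : Int)
    (hnd : (l.map (fun p => p.1)).Nodup) (hmem : (sid, chs) ∈ l) :
    ((l.flatMap (fun p => (p.2.filter (fun cid => cid == c)).map (fun _ => p.1))).filter (fun s => s == sid))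
      = (chs.filter (fun cid => cid == c)).map (fun _ => sid) := by
  induction l with
  | nil => simp at hmem
  | cons p t ih =>
    simp only [List.map_cons, List.nodup_cons] at hnd
    rcases List.mem_cons.mp hmem with heq | hmem'
    · subst heq
      simp only [List.flatMap_cons, List.filter_append]
      rw [pvInvFilterNot t sid c hnd.1, List.append_nil, List.filter_map]
      have : ((chs.filter (fun cid => cid == c)).filter ((fun s => s == sid) ∘ (fun _ => (sid, chs).1)))
          = chs.filter (fun cid => cid == c) :=
        List.filter_eq_self.mpr (fun a _ => by simp)
      rw [this]
    · have hne : p.1 ≠ sid := fun hcon =>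
        hnd.1 (by rw [hcon]; exact List.mem_map.mpr ⟨(sid, chs), hmem', rfl⟩)
      simp only [List.flatMap_cons, List.filter_append]
      have hz : (((p.2.filter (fun cid => cid == c)).map (fun _ => p.1)).filter (fun s => s == sid)) = [] := by
        refine List.filter_eq_nil_iff.mpr ?_
        intro a ha
        rcases List.mem_map.mp ha with ⟨x, _, rfl⟩
        simp only [beq_iff_eq]
        exact hne
      rw [hz, List.nil_append, ih hnd.2 hmem']

-- a single-key pick out of an association list with distinct keys
theorem pvFlatIfNot {T : Type} (l : List (Int × List T)) (c : Int) (h : c ∉ l.map (fun p => p.1)) :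
    l.flatMap (fun q => if c = q.1 then q.2 else []) = [] := by
  induction l with
  | nil => rfl
  | cons p t ih =>
    simp only [List.map_cons, List.mem_cons, not_or] at h
    simp [List.flatMap_cons, h.1, ih h.2]

theorem pvFlatIfMem {T : Type} (l : List (Int × List T)) (c : Int) (v : List T)
    (hnd : (l.map (fun p => p.1)).Nodup) (hmem : (c, v) ∈ l) :
    l.flatMap (fun q => if c = q.1 then q.2 else []) = v := by
  induction l with
  | nil => simp at hmem
  | cons p t ih =>
    simp only [List.map_cons, List.nodup_cons] at hnd
    rcases List.mem_cons.mp hmem with heq | hmem'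
    · subst heq
      simp only [List.flatMap_cons]
      rw [pvFlatIfNot t c (by simpa using hnd.1)]
      simp
    · have hne : c ≠ p.1 := fun hcon =>
        hnd.1 (by rw [← hcon]; exact List.mem_map.mpr ⟨(c, v), hmem', rfl⟩)
      simp [List.flatMap_cons, hne, ih hnd.2 hmem']

theorem pvGetDFlatIf (d : PySem.Dict Int (List (Int × Int × Bool))) (c : Int)
    (hnd : d.keys.Nodup) :
    d.items.flatMap (fun q => if c = q.1 then q.2 else []) = d.getD c [] := by
  by_cases hc : c ∈ d.keys
  · have h0 : d.get? c ≠ none := fun hn =>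
      ((PySem.Dict.get?_eq_none_iff_not_mem_keys d c).mp hn) hc
    obtain ⟨v, hv⟩ := Option.ne_none_iff_exists'.mp h0
    have hmem : (c, v) ∈ d.items := (PySem.Dict.get?_eq_some_iff_mem_items d c v hnd).mp hv
    rw [pvFlatIfMem d.items c v hnd hmem, PySem.Dict.getD_eq_get?_getD, hv]
    rfl
  · rw [pvFlatIfNot d.items c hc, PySem.Dict.getD_eq_get?_getD,
      (PySem.Dict.get?_eq_none_iff_not_mem_keys d c).mpr hc]
    rfl

theorem pvPermFlatMapAppend {α β : Type} (l : List α) (f g : α → List β) :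
    (l.flatMap (fun x => f x ++ g x)).Perm (l.flatMap f ++ l.flatMap g) := by
  induction l with
  | nil => simp
  | cons a t ih =>
    simp only [List.flatMap_cons]
    refine ((ih.append_left (f a ++ g a))).trans ?_
    simp only [List.append_assoc]
    refine List.Perm.append_left (f a) ?_
    exact List.perm_append_comm_assoc (g a) (t.flatMap f) (t.flatMap g)

-- A's per-station gathering is a permutation of B's bucket
theorem pvBucketPerm (chargers : List Int) (crd : PySem.Dict Int (List (Int × Int × Bool)))
    (hnd : crd.keys.Nodup) :
    (chargers.flatMap (fun cid => crd.getD cid [])).Perm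
      (crd.items.flatMap (fun q => (chargers.filter (fun x => x == q.1)).flatMap (fun _ => q.2))) := by
  induction chargers with
  | nil => simp
  | cons cid cs ih =>
    have hsplit : (fun (q : Int × List (Int × Int × Bool)) =>
          ((cid :: cs).filter (fun x => x == q.1)).flatMap (fun _ => q.2))
        = fun q => (if cid = q.1 then q.2 else []) ++ (cs.filter (fun x => x == q.1)).flatMap (fun _ => q.2) := by
      funext q
      by_cases hc : cid = q.1 <;> simp [hc]
    simp only [List.flatMap_cons, hsplit]
    refine List.Perm.trans ?_ (pvPermFlatMapAppend crd.items _ _).symm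
    rw [pvGetDFlatIf crd cid hnd]
    exact List.Perm.append_left _ ih

theorem pvFlatMapConst {α β γ : Type} (L : List α) (f : α → β) (v : List γ) :
    (L.map f).flatMap (fun _ => v) = L.flatMap (fun _ => v) := by
  induction L with
  | nil => rfl
  | cons x t ih => simp only [List.map_cons, List.flatMap_cons, ih]

-- the per-station values agree
theorem pvPerSid (sc : List (Int × List Int)) (cr : List (Int × List (Int × Int × Bool))) (sid : Int)
    (hsid : sid ∈ (PySem.Dict.ofList sc).keys) :
    pvStationValueA (PySem.Dict.ofList cr) ((PySem.Dict.ofList sc).getD sid [])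
      = pvUptimePct
          ((List.foldl
              (fun (d : PySem.Dict Int (List (Int × Int × Bool))) (q : Int × List (Int × Int × Bool)) =>
                List.foldl (fun d sid => d.modify sid [] (fun x => x ++ q.2)) d
                  ((List.foldl (fun (d : PySem.Dict Int (List Int)) (p : Int × List Int) =>
                        List.foldl (fun d cid => d.modify cid [] (fun x => x ++ [p.1])) d p.2)
                      PySem.Dict.empty (PySem.Dict.ofList sc).items).getD q.1 []))
              (List.foldl (fun (d : PySem.Dict Int (List (Int × Int × Bool))) sid => d.insert sid [])
                PySem.Dict.empty (PySem.Dict.ofList sc).keys)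
              ((PySem.Dict.ofList cr).items)).getD sid []) := by
  have hndS : (PySem.Dict.ofList sc).keys.Nodup := PySem.Dict.nodup_keys_ofList sc
  have hndC : (PySem.Dict.ofList cr).keys.Nodup := PySem.Dict.nodup_keys_ofList cr
  have h0 : (PySem.Dict.ofList sc).get? sid ≠ none := fun hn =>
    ((PySem.Dict.get?_eq_none_iff_not_mem_keys _ sid).mp hn) hsid
  obtain ⟨chs, hch⟩ := Option.ne_none_iff_exists'.mp h0
  have hmemI : (sid, chs) ∈ (PySem.Dict.ofList sc).items :=
    (PySem.Dict.get?_eq_some_iff_mem_items _ sid chs hndS).mp hch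
  have hgetD : (PySem.Dict.ofList sc).getD sid [] = chs := by
    rw [PySem.Dict.getD_eq_get?_getD, hch]; rfl
  rw [pvBucketsGetD, pvBuckets0GetD _ _ _ (PySem.Dict.getD_empty sid []), List.nil_append]
  have hinv : ∀ c : Int,
      ((List.foldl (fun (d : PySem.Dict Int (List Int)) (p : Int × List Int) =>
            List.foldl (fun d cid => d.modify cid [] (fun x => x ++ [p.1])) d p.2)
          PySem.Dict.empty (PySem.Dict.ofList sc).items).getD c [])
        = (PySem.Dict.ofList sc).items.flatMap (fun p => (p.2.filter (fun cid => cid == c)).map (fun _ => p.1)) := by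
    intro c
    rw [pvInvGetD, PySem.Dict.getD_empty, List.nil_append]
  simp only [hinv]
  have hfil : ∀ c : Int,
      (((PySem.Dict.ofList sc).items.flatMap (fun p => (p.2.filter (fun cid => cid == c)).map (fun _ => p.1))).filter (fun s => s == sid))
        = (chs.filter (fun cid => cid == c)).map (fun _ => sid) :=
    fun c => pvInvFilter _ sid chs c hndS hmemI
  simp only [hfil]
  rw [pvStationValueA_eq, hgetD]
  refine pvValuePerm _ _ ?_
  refine (pvBucketPerm chs (PySem.Dict.ofList cr) hndC).trans (List.Perm.of_eq (List.flatMap_congr ?_))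
  intro q _
  exact (pvFlatMapConst (chs.filter (fun x => x == q.1)) (fun _ => sid) q.2).symm

-- ===== VERDICT (by name: the statement is the Claim_ definition above) =====
theorem compute_station_uptimes_spec : Claim_equal_compute_station_uptimes := by
  intro sc cr _
  show compute_station_uptimes sc cr = compute_station_uptimes_alt sc cr
  unfold compute_station_uptimes compute_station_uptimes_alt
  refine congrArg PySem.Dict.items ?_
  refine PySem.List.foldl_congr_mem _ _ _ _ ?_
  intro acc sid hmem
  have hk : sid ∈ (PySem.Dict.ofList sc).keys := (PySem.List.mem_sorted _ _ _ _).mp hmem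
  exact congrArg (fun v => acc.insert sid v) (pvPerSid sc cr sid hk)
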